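-- pv_equiv track=rewrite | github.com/amimul1/Infographic | infographic.py | most_occurance
-- ===== SOURCE A (Python) =====
-- def most_occurance(words_dict):
--     '''
--     This function calculates the most times each type of words appears in
--     the text file and returns the word and the number of times they appeared
--     for each case.
--     words_dict: a dictionary containing the unique words as keys and the occurences as values
--     '''
--     small_word_occurance=0
--     medium_word_occurance=0
--     large_word_occurance=0
--     #for loop which loops through the dictionary and checks for each type of word according to
--     # the specified size in the spec
--     for word, occurences in words_dict.items():
--         # if statements to classify the different type of words according to lengths
--         if len(word)<=4:
--             if small_word_occurance < words_dict[word]: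
--                 most_used_small_word = word
--                 small_word_occurance = words_dict[word]
--
--         elif len(word)>= 5 and len(word)<=7:
--             if medium_word_occurance < words_dict[word]:
--                 most_used_medium_word = word
--                 medium_word_occurance = words_dict[word]
--
--         elif len(word)>= 8 :
--             if large_word_occurance < words_dict[word]:
--                 most_used_large_word = word
--                 large_word_occurance = words_dict[word]
--     # The calculated info is displayed in the following way as a string to match spec
--     small_word_occurance = ' ' + '(' + str(small_word_occurance) + 'x' + ')' + ' '
--     medium_word_occurance = ' ' + '(' + str(medium_word_occurance) + 'x' + ')' + ' '
--     large_word_occurance = ' ' + '(' + str(large_word_occurance) + 'x' + ')' + ' '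
--     # returns the word and the number of times they appeared for each case.
--     return small_word_occurance,most_used_small_word, medium_word_occurance, \
--     most_used_medium_word ,large_word_occurance, most_used_large_word
-- ===== SOURCE B (Python) =====
-- def _best(items, lo, hi=None):
--     """Best (most frequent) word with lo <= len(word) (<= hi); strict '<' keeps the first maximum."""
--     best_occ = 0
--     for word, occ in items:
--         n = len(word)
--         if lo <= n and (hi is None or n <= hi) and best_occ < occ:
--             best_word = word
--             best_occ = occ
--     return best_occ, best_word
--
--
-- def most_occurance(words_dict):
--     items = list(words_dict.items())
--     small_occ, small_word = _best(items, 0, 4)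
--     medium_occ, medium_word = _best(items, 5, 7)
--     large_occ, large_word = _best(items, 8)
--     return (' (' + str(small_occ) + 'x) ', small_word,
--             ' (' + str(medium_occ) + 'x) ', medium_word,
--             ' (' + str(large_occ) + 'x) ', large_word)
-- ===== Notes on version B (the rewrite author's own statement) =====
-- stated objective: alternative
-- what changed: Replaces the single pass with per-word branch dispatch and dict re-lookup by one parameterized helper (length range [lo,hi], strict-'<' best scan over the items) called three times, then assembles the strings.
import Mathlib
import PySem

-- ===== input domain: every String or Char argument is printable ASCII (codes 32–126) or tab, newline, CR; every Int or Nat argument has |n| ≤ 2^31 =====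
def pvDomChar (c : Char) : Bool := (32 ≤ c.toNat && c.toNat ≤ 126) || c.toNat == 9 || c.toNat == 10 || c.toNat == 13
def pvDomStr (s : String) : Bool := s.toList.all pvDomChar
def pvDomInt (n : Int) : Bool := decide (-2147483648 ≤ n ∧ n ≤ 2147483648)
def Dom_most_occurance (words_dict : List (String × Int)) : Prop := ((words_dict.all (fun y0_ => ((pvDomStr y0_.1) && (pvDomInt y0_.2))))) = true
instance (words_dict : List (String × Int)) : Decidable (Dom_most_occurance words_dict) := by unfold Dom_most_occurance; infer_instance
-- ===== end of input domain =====

-- B replaces A's single branch-per-word pass (with dict re-lookup) by one parameterized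
-- best-in-length-range helper called three times; same cost, different decomposition.


-- ===== PORT A =====
-- loop body of A's single for-loop, named so the proofs can speak about it; state:
-- (small_occ, most_small?, medium_occ, most_medium?, large_occ, most_large?);
-- the 'most_used_*' variables start unassigned in Python -> Option, none = unbound.
def pvStepA (d : PySem.Dict String Int)
    (s : Int × Option String × Int × Option String × Int × Option String)
    (p : String × Int) : Int × Option String × Int × Option String × Int × Option String :=
  let (swo, musw, mwo, mumw, lwo, mulw) := s
  let word := p.1
  if PySem.Str.len word ≤ 4 then
    if swo < (d.get? word).getD 0 then
      ((d.get? word).getD 0, some word, mwo, mumw, lwo, mulw)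
    else s
  else if 5 ≤ PySem.Str.len word ∧ PySem.Str.len word ≤ 7 then
    if mwo < (d.get? word).getD 0 then
      (swo, musw, (d.get? word).getD 0, some word, lwo, mulw)
    else s
  else if 8 ≤ PySem.Str.len word then
    if lwo < (d.get? word).getD 0 then
      (swo, musw, mwo, mumw, (d.get? word).getD 0, some word)
    else s
  else s

def most_occurance (words_dict : List (String × Int)) : String × String × String × String × String × String :=
  let d := PySem.Dict.mk words_dict
  let st := d.items.foldl (pvStepA d) (0, none, 0, none, 0, none)
  (" (" ++ PySem.Int.toStr st.1 ++ "x) ", (st.2.1).getD "",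
   " (" ++ PySem.Int.toStr st.2.2.1 ++ "x) ", (st.2.2.2.1).getD "",
   " (" ++ PySem.Int.toStr st.2.2.2.2.1 ++ "x) ", (st.2.2.2.2.2).getD "")

-- ===== PORT B =====
-- _best(items, lo, hi): one scan, strict '<'; best_word unassigned until first hit -> Option;
-- 'hi is None or n <= hi' is the Option.all test.
def pvStepB (lo : Int) (hi : Option Int) (s : Int × Option String) (p : String × Int) :
    Int × Option String :=
  let n := PySem.Str.len p.1
  if lo ≤ n ∧ (hi.all fun h => decide (n ≤ h)) = true ∧ s.1 < p.2 then (p.2, some p.1) else s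

def pvBest (items : List (String × Int)) (lo : Int) (hi : Option Int) : Int × Option String :=
  items.foldl (pvStepB lo hi) (0, none)

def most_occurance_alt (words_dict : List (String × Int)) : String × String × String × String × String × String :=
  let items := (PySem.Dict.mk words_dict).items
  let sm := pvBest items 0 (some 4)
  let md := pvBest items 5 (some 7)
  let lg := pvBest items 8 none
  (" (" ++ PySem.Int.toStr sm.1 ++ "x) ", sm.2.getD "",
   " (" ++ PySem.Int.toStr md.1 ++ "x) ", md.2.getD "",
   " (" ++ PySem.Int.toStr lg.1 ++ "x) ", lg.2.getD "")

-- ===== PRECONDITION & SPEC =====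
-- Pre_ excludes (i) assoc lists with duplicate keys, which no Python dict argument can
-- contain (the dict collapses them before A ever runs), and (ii) inputs where some length
-- bucket (≤4, 5–7, ≥8) holds no word with positive count, on which A (and B) raises
-- UnboundLocalError instead of returning.
def Pre_most_occurance (words_dict : List (String × Int)) : Prop :=
  (words_dict.map Prod.fst).Nodup ∧
  (∃ p ∈ words_dict, PySem.Str.len p.1 ≤ 4 ∧ 0 < p.2) ∧
  (∃ p ∈ words_dict, 5 ≤ PySem.Str.len p.1 ∧ PySem.Str.len p.1 ≤ 7 ∧ 0 < p.2) ∧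
  (∃ p ∈ words_dict, 8 ≤ PySem.Str.len p.1 ∧ 0 < p.2)
instance (words_dict : List (String × Int)) : Decidable (Pre_most_occurance words_dict) := by
  unfold Pre_most_occurance; infer_instance

def pvWitness_most_occurance : (List (String × Int)) :=
  [("the", 3), ("little", 2), ("elephant", 1)]

def Spec_most_occurance (words_dict : List (String × Int)) (out : String × String × String × String × String × String) : Prop := out = most_occurance_alt words_dict
instance (words_dict : List (String × Int)) (out : String × String × String × String × String × String) : Decidable (Spec_most_occurance words_dict out) := by unfold Spec_most_occurance; infer_instance

-- ===== CLAIM (what is proved, stated in full; the proofs are below) =====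
def Claim_equal_most_occurance : Prop := ∀ (words_dict : List (String × Int)), Dom_most_occurance words_dict → Pre_most_occurance words_dict → Spec_most_occurance words_dict (most_occurance words_dict)

-- ===== LEMMAS AND PROOFS =====

-- One step of A's combined loop is the triple of one step of each of B's three scans,
-- provided the dict lookup of the visited key returns that pair's own value.
theorem pv_step_split (d : PySem.Dict String Int) (p : String × Int)
    (hp : (d.get? p.1).getD 0 = p.2) (s1 s2 s3 : Int × Option String) :
    pvStepA d (s1.1, s1.2, s2.1, s2.2, s3.1, s3.2) p =
      ((pvStepB 0 (some 4) s1 p).1, (pvStepB 0 (some 4) s1 p).2,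
       (pvStepB 5 (some 7) s2 p).1, (pvStepB 5 (some 7) s2 p).2,
       (pvStepB 8 none s3 p).1, (pvStepB 8 none s3 p).2) := by
  have hn : (0 : Int) ≤ PySem.Str.len p.1 := by simp [PySem.Str.len_eq]
  simp only [pvStepA, pvStepB, hp, Option.all_some, Option.all_none, decide_eq_true_eq, true_and]
  split_ifs <;> first | rfl | omega

-- A's fold over the combined 6-tuple state splits into B's three independent scans.
theorem pv_fold_split (d : PySem.Dict String Int) (l : List (String × Int))
    (hl : ∀ p ∈ l, (d.get? p.1).getD 0 = p.2) :
    ∀ (a1 : Int) (w1 : Option String) (a2 : Int) (w2 : Option String)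
      (a3 : Int) (w3 : Option String),
    l.foldl (pvStepA d) (a1, w1, a2, w2, a3, w3) =
      ((l.foldl (pvStepB 0 (some 4)) (a1, w1)).1, (l.foldl (pvStepB 0 (some 4)) (a1, w1)).2,
       (l.foldl (pvStepB 5 (some 7)) (a2, w2)).1, (l.foldl (pvStepB 5 (some 7)) (a2, w2)).2,
       (l.foldl (pvStepB 8 none) (a3, w3)).1, (l.foldl (pvStepB 8 none) (a3, w3)).2) := by
  induction l with
  | nil => intro a1 w1 a2 w2 a3 w3; rfl
  | cons p t ih =>
    intro a1 w1 a2 w2 a3 w3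
    have hp : (d.get? p.1).getD 0 = p.2 := hl p (by simp)
    have ht : ∀ q ∈ t, (d.get? q.1).getD 0 = q.2 := fun q hq => hl q (by simp [hq])
    simp only [List.foldl_cons, pv_step_split d p hp (a1, w1) (a2, w2) (a3, w3)]
    have := ih ht (pvStepB 0 (some 4) (a1, w1) p).1 (pvStepB 0 (some 4) (a1, w1) p).2
      (pvStepB 5 (some 7) (a2, w2) p).1 (pvStepB 5 (some 7) (a2, w2) p).2
      (pvStepB 8 none (a3, w3) p).1 (pvStepB 8 none (a3, w3) p).2
    simpa using this

-- ===== VERDICT (by name: the statement is the Claim_ definition above) =====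
theorem most_occurance_spec : Claim_equal_most_occurance := by
  intro wd _hdom hpre
  unfold Spec_most_occurance most_occurance most_occurance_alt pvBest
  have hnd : (PySem.Dict.mk wd).keys.Nodup := hpre.1
  have hl : ∀ p ∈ (PySem.Dict.mk wd).items,
      ((PySem.Dict.mk wd).get? p.1).getD 0 = p.2 := by
    intro p hp
    obtain ⟨k, v⟩ := p
    simpa [PySem.Dict.getD_eq_get?_getD] using PySem.Dict.getD_of_mem_items _ hp hnd 0
  have h := pv_fold_split (PySem.Dict.mk wd) (PySem.Dict.mk wd).items hl 0 none 0 none 0 none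
  simp only [h]
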